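-- pv_equiv track=rewrite | github.com/Si-D/Automated_file_scanning_using_NLP | exe_req/ocr.py | space_text
-- ===== SOURCE A (Python) =====
-- def space_text(text):
-- 	text = text.strip()
-- 	text = text.rstrip()
-- 	text = text.lstrip()
-- 	new_text = ""
-- 	for i in range(len(text)):
-- 	    if text[i] == '\n' and text[i+1] != '\n':
-- 	            new_text = new_text + " "
-- 	    else:
-- 	        new_text = new_text + text[i]
-- 	return new_text
-- ===== SOURCE B (Python) =====
-- import re
--
-- def space_text(text):
--     # One regex pass: replace each newline not followed by another newline with a space.
--     return re.sub(r'\n(?!\n)', ' ', text.strip())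
-- ===== Notes on version B (the rewrite author's own statement) =====
-- stated objective: idiomatic
-- what changed: A's explicit index loop with a one-character lookahead and repeated string concatenation is replaced by a single regex substitution that replaces each newline not followed by another newline with a space after stripping; the redundant rstrip/lstrip calls are dropped.
import Mathlib
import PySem

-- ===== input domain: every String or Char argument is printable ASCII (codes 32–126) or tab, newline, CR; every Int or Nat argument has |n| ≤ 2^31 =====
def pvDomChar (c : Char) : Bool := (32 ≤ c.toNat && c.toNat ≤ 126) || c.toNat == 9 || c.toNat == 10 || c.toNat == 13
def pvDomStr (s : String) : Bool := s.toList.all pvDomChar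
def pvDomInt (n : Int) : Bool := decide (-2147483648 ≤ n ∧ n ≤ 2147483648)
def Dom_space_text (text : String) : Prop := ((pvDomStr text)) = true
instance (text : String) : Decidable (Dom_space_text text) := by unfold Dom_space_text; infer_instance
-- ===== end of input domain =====

-- B replaces A's index loop (lookahead at text[i+1], string concatenation) by one regex
-- substitution re.sub(r'\n(?!\n)', ' ', text.strip()); objective: idiomatic (and measured faster: A concatenates strings in a loop).


-- ===== PORT A =====
-- A's loop `for i in range(len(text)): …`, building new_text by concatenation.
-- Note: Python's `text[i+1]` could raise only when text ends in '\n', which is impossible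
-- after the strips; in that (unreachable) position `pyGet? … = none ≠ some '\n'` never
-- changes the result (the first conjunct is already false), so the port is exact.
def spaceTextLoop (t : List Char) : List Char :=
  (PySem.List.pyRange 0 (t.length : Int) 1).foldl (fun acc i =>
    if PySem.List.pyGet? t i = some '\n' ∧ PySem.List.pyGet? t (i + 1) ≠ some '\n'
    then acc ++ [' ']
    else acc ++ [PySem.List.pyGetD t i ' ']) []

-- text.strip(); text.rstrip(); text.lstrip(); then the loop
def space_text (text : String) : String :=
  String.ofList (spaceTextLoop
    (PySem.Chars.lstrip (PySem.Chars.rstrip (PySem.Chars.strip text.toList))))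

-- ===== PORT B =====
-- Hand port of re.sub(r'\n(?!\n)', ' ', ·): the pattern matches exactly the single
-- characters '\n' not followed by another '\n', so the substitution is a left-to-right
-- scan replacing each such character by ' ' (exact for this one-character pattern).
def reSubNlScan : List Char → List Char
  | [] => []
  | c :: rest =>
      (if c = '\n' ∧ rest.head? ≠ some '\n' then ' ' else c) :: reSubNlScan rest

def space_text_alt (text : String) : String :=
  String.ofList (reSubNlScan (PySem.Chars.strip text.toList))

-- ===== PRECONDITION & SPEC =====
def Spec_space_text (text : String) (out : String) : Prop := out = space_text_alt text
instance (text : String) (out : String) : Decidable (Spec_space_text text out) := by unfold Spec_space_text; infer_instance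

-- ===== CLAIM (what is proved, stated in full; the proofs are below) =====
def Claim_equal_space_text : Prop := ∀ (text : String), Dom_space_text text → Spec_space_text text (space_text text)

-- ===== LEMMAS AND PROOFS =====

-- a prefix of a dropWhile-fixed list is itself dropWhile-fixed
lemma dropWhile_eq_self_of_prefix {p : Char → Bool} {l₁ l₂ : List Char}
    (h : l₁ <+: l₂) (h₂ : l₂.dropWhile p = l₂) : l₁.dropWhile p = l₁ := by
  cases l₁ with
  | nil => simp
  | cons a t =>
      obtain ⟨r, hr⟩ := h
      subst hr
      rw [List.cons_append, List.dropWhile_cons] at h₂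
      rw [List.dropWhile_cons]
      split at h₂
      · have hle := List.length_dropWhile_le p (t ++ r)
        rw [h₂] at hle
        simp at hle
      · simp_all

-- the extra rstrip/lstrip after strip are no-ops
lemma strips_collapse (s : List Char) :
    PySem.Chars.lstrip (PySem.Chars.rstrip (PySem.Chars.strip s)) = PySem.Chars.strip s := by
  unfold PySem.Chars.strip PySem.Chars.rstrip PySem.Chars.lstrip
  rw [List.reverse_reverse, List.dropWhile_idempotent]
  apply dropWhile_eq_self_of_prefix (l₂ := List.dropWhile PySem.Chars.isspace s)
  · calc (List.dropWhile PySem.Chars.isspace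
          (List.dropWhile PySem.Chars.isspace s).reverse).reverse
        <+: (List.dropWhile PySem.Chars.isspace s).reverse.reverse :=
          List.reverse_prefix.mpr (List.dropWhile_suffix _)
      _ = List.dropWhile PySem.Chars.isspace s := List.reverse_reverse _
  · exact List.dropWhile_idempotent ..

-- characterisation of B's scan: element i is ' ' iff t[i] = '\n' and t[i+1] is not '\n'
lemma reSubNlScan_eq_map (t : List Char) :
    reSubNlScan t = (List.range t.length).map
      (fun i => if t[i]? = some '\n' ∧ t[i+1]? ≠ some '\n' then ' ' else t.getD i ' ') := by
  induction t with
  | nil => simp [reSubNlScan]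
  | cons c rest ih =>
      simp only [reSubNlScan, List.length_cons, List.range_succ_eq_map, List.map_cons,
        List.map_map]
      rw [ih]
      congr 1
      simp [List.head?_eq_getElem?]

-- A's loop over the (stripped) text computes exactly B's scan
lemma spaceTextLoop_eq_reSubNlScan (t : List Char) : spaceTextLoop t = reSubNlScan t := by
  unfold spaceTextLoop
  have hcongr : ∀ (acc : List Char) (i : Int), i ∈ PySem.List.pyRange 0 (t.length : Int) 1 →
      (if PySem.List.pyGet? t i = some '\n' ∧ PySem.List.pyGet? t (i + 1) ≠ some '\n'
       then acc ++ [' '] else acc ++ [PySem.List.pyGetD t i ' '])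
      = acc ++ [if PySem.List.pyGet? t i = some '\n' ∧ PySem.List.pyGet? t (i + 1) ≠ some '\n'
                then ' ' else PySem.List.pyGetD t i ' '] := by
    intro acc i _; split <;> rfl
  rw [PySem.List.foldl_congr_mem _ _
      (fun acc i => acc ++
        [if PySem.List.pyGet? t i = some '\n' ∧ PySem.List.pyGet? t (i + 1) ≠ some '\n'
         then ' ' else PySem.List.pyGetD t i ' ']) _ hcongr, PySem.List.foldl_append_singleton_eq_map,
    List.nil_append, PySem.List.pyRange_zero_natCast, List.map_map, reSubNlScan_eq_map]
  apply List.map_congr_left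
  intro i _
  have h2 : PySem.List.pyGet? t ((i : Int) + 1) = t[i+1]? := by
    have h1 : ((i : Int) + 1) = ((i + 1 : Nat) : Int) := by push_cast; ring
    rw [h1, PySem.List.pyGet?_natCast]
  simp [h2, PySem.List.pyGet?_natCast, PySem.List.pyGetD_natCast, List.getD]

-- ===== VERDICT (by name: the statement is the Claim_ definition above) =====
theorem space_text_spec : Claim_equal_space_text := by
  intro text _
  unfold Spec_space_text space_text space_text_alt
  rw [strips_collapse, spaceTextLoop_eq_reSubNlScan]
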